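-- pv_equiv track=rewrite | github.com/ml5885/memorization_privacy_and_unlearning | data/ifeval.py | has_postscript
-- ===== SOURCE A (Python) =====
-- def has_postscript(text, marker):
--     """Check if the text has a postscript with the given marker."""
--     if not marker:
--         return False
--
--     for line in reversed(text.splitlines()):
--         if line.strip().startswith(marker):
--             return True
--         if line.strip():
--             break
--
--     return False
-- ===== SOURCE B (Python) =====
-- def has_postscript(text, marker):
--     """Check if the text has a postscript with the given marker."""
--     if not marker:
--         return False
--     last = ""
--     for line in text.splitlines():
--         s = line.strip()
--         if s:
--             last = s
--     return last.startswith(marker)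
-- ===== Notes on version B (the rewrite author's own statement) =====
-- stated objective: alternative
-- what changed: Replaces the reverse scan with early break by a single forward pass that accumulates the last non-empty stripped line and tests it once after the loop.
import Mathlib
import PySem

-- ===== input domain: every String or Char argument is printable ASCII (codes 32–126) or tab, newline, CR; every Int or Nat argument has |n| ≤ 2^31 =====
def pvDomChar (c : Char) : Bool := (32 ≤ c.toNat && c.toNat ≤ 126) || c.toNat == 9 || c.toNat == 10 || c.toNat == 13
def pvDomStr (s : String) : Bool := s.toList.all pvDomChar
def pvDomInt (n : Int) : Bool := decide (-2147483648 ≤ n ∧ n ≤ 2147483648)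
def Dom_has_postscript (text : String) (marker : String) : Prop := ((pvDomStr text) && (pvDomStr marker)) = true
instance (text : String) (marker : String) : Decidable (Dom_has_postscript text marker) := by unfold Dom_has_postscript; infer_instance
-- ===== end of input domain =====

-- B replaces A's reverse scan with early break by a forward pass accumulating the last
-- non-empty stripped line, tested once after the loop (objective: alternative decomposition).

-- ===== PORT A =====
-- the for-loop over reversed(text.splitlines()) with its early return/break
def hpLoopA (m : String) : List String → Bool
  | [] => false
  | l :: rest =>
      if PySem.Str.startswith (PySem.Str.strip l) m then true
      else if PySem.Str.strip l ≠ "" then false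
      else hpLoopA m rest

def has_postscript (text : String) (marker : String) : Bool :=
  if marker = "" then false
  else hpLoopA marker (PySem.Str.splitlines text).reverse

-- ===== PORT B =====
def has_postscript_alt (text : String) (marker : String) : Bool :=
  if marker = "" then false
  else
    let last := (PySem.Str.splitlines text).foldl
      (fun acc l => let s := PySem.Str.strip l; if s ≠ "" then s else acc) ""
    PySem.Str.startswith last marker

-- ===== PRECONDITION & SPEC =====
def Spec_has_postscript (text : String) (marker : String) (out : Bool) : Prop := out = has_postscript_alt text marker
instance (text : String) (marker : String) (out : Bool) : Decidable (Spec_has_postscript text marker out) := by unfold Spec_has_postscript; infer_instance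

-- ===== CLAIM (what is proved, stated in full; the proofs are below) =====
def Claim_equal_has_postscript : Prop := ∀ (text : String) (marker : String), Dom_has_postscript text marker → Spec_has_postscript text marker (has_postscript text marker)

-- ===== LEMMAS AND PROOFS =====

theorem startswith_empty_left {m : String} (hm : m ≠ "") :
    PySem.Chars.startswith [] m.toList = false := by
  rw [Bool.eq_false_iff]
  intro h
  rw [PySem.Chars.startswith_iff] at h
  have hnil : m.toList = [] := List.prefix_nil.mp h
  exact hm (by simpa using hnil)

theorem hpLoopA_eq_fold {m : String} (hm : m ≠ "") (ls : List String) :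
    hpLoopA m ls =
      PySem.Str.startswith
        (ls.reverse.foldl
          (fun acc l => let s := PySem.Str.strip l; if s ≠ "" then s else acc) "")
        m := by
  induction ls with
  | nil => simp [hpLoopA, startswith_empty_left hm]
  | cons l rest ih =>
      simp only [hpLoopA, List.reverse_cons, List.foldl_append, List.foldl_cons, List.foldl_nil]
      by_cases hs : PySem.Str.strip l = ""
      · simp [hs, startswith_empty_left hm, ih]
      · simp only [hs, ne_eq, not_false_eq_true, if_pos]
        by_cases hw : PySem.Str.startswith (PySem.Str.strip l) m = true
        · simp
        · simp only [Bool.not_eq_true] at hw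
          simp

-- ===== VERDICT (by name: the statement is the Claim_ definition above) =====
theorem has_postscript_spec : Claim_equal_has_postscript := by
  intro text marker _
  unfold Spec_has_postscript has_postscript has_postscript_alt
  by_cases hm : marker = ""
  · simp [hm]
  · simp only [hm, if_false]
    simpa using hpLoopA_eq_fold hm (PySem.Str.splitlines text).reverse
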